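-- pv_equiv track=rewrite | github.com/Domnm/ADS | Task2/main.py | place_incrementally
-- ===== SOURCE A (Python) =====
-- def triangular_numbers(n):
--     i, t = 1, 0
--     while i <= n:
--         yield t
--         t += i
--         i += 1
--
-- def check_cell(board, m, poz):
--
--     # checks rows
--     # Works by counting 1s in a sublists
--     ix = 0
--     jx = 0
--     for row in range(0, m):
--         ix += row + 1
--         if poz < ix and poz >= jx:
--             if board[jx:ix].count(1) > 0:
--                 return False
--         jx += row + 1
--
--     # checks columns
--     # builds a list of all possitions in that column
--     possitions = list(triangular_numbers(m))
--     for col in range(0, m):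
--         if poz in possitions:
--             count = 0
--             for pos in possitions:
--                 if board[pos]:
--                     count += 1
--                 if count > 0:
--                     return False
--
--             break
--
--         possitions = list(map(lambda x: x + 1, possitions[1:]))
--
--     # Checks diagonals
--     triangular_nums = list(triangular_numbers(m))
--     for diag in range(0, m):
--
--         possitions = []
--         for ix, pos in enumerate(triangular_nums):
--             possitions.append(ix + pos)
--
--         if poz in possitions:
--             count = 0
--             for pos in possitions:
--                 if board[pos] == 1:
--                     count += 1
--                 if count > 0:
--                     return False
--
--         possitions = possitions[1:]
--
--     return True
--
-- def place_incrementally(boards, board, poz, left, m):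
--
--     # Switch the lines bellow for full list of valid boards
--     # if left >= 0:
--     if left >= 0 and len(boards) == 0:
--         ran = range(poz + 1, len(board) - left)
--         for p in ran:
--             board_copy = board.copy()
--
--             if check_cell(board_copy, m, p):
--                 board_copy[p] = 1
--
--                 if left == 0:
--                     boards.append(board_copy)
--
--                     # Remove the line bellow for full list of valid boards
--                     break
--
--                 else:
--                     place_incrementally(boards, board_copy, p, left - 1, m)
--
--     return boards
-- ===== SOURCE B (Python) =====
-- # B: (1) check_cell is re-derived from coordinates: row r and column c of poz are computed
-- # from the closed-form triangular number _tri(r) = r*(r+1)//2, so the generator, the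
-- # accumulator pair (ix, jx), the repeated list-shifting and the rebuilt diagonal lists
-- # of A all disappear; (2) the search is a pure Option-returning first-solution DFS that
-- # returns the first completed board up the call chain immediately, instead of threading
-- # the shared `boards` accumulator through the recursion gated by len(boards)==0.
-- # Like A, it appends the found board to `boards` in place and returns `boards`.
--
-- def _tri(r):
--     return r * (r + 1) // 2
--
--
-- def check_cell(board, m, poz):
--     # row: if poz lies in row r (of the first m rows), that row must hold no 1
--     for r in range(m):
--         if _tri(r) <= poz < _tri(r + 1):
--             if 1 in board[_tri(r):_tri(r + 1)]:
--                 return False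
--             break
--     # column: column c of poz holds the cells _tri(rr)+c for rows rr = c..m-1
--     for r in range(m):
--         if _tri(r) <= poz < _tri(r + 1):
--             c = poz - _tri(r)
--             for rr in range(c, m):
--                 if board[_tri(rr) + c]:
--                     return False
--             break
--     # diagonal: the right edge _tri(rr)+rr, rr = 0..m-1
--     for r in range(m):
--         if poz == _tri(r) + r:
--             for rr in range(m):
--                 if board[_tri(rr) + rr] == 1:
--                     return False
--             break
--     return True
--
--
-- def _solve(board, poz, left, m):
--     # first completed board in leftmost depth-first order, or None
--     for p in range(poz + 1, len(board) - left):
--         if check_cell(board, m, p):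
--             bc = board.copy()
--             bc[p] = 1
--             if left == 0:
--                 return bc
--             sub = _solve(bc, p, left - 1, m)
--             if sub is not None:
--                 return sub
--     return None
--
--
-- def place_incrementally(boards, board, poz, left, m):
--     if left >= 0 and len(boards) == 0:
--         found = _solve(board, poz, left, m)
--         if found is not None:
--             boards.append(found)
--     return boards
-- ===== Notes on version B (the rewrite author's own statement) =====
-- stated objective: alternative
-- what changed: B recomputes check_cell from closed-form coordinates (row r and column c of poz via tri(r)=r(r+1)//2, indexing cells directly) instead of A's generator, running (ix,jx) accumulators, repeated list-shifting and rebuilt diagonal lists, and replaces A's accumulator-threaded recursion gated by len(boards)==0 with a pure Option-returning first-solution DFS whose result the wrapper appends once.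
-- outside the precondition, e.g. on place_incrementally([], [1, 1, 1, 1], -1, 0, 3): A returns [], B returns []
import Mathlib
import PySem

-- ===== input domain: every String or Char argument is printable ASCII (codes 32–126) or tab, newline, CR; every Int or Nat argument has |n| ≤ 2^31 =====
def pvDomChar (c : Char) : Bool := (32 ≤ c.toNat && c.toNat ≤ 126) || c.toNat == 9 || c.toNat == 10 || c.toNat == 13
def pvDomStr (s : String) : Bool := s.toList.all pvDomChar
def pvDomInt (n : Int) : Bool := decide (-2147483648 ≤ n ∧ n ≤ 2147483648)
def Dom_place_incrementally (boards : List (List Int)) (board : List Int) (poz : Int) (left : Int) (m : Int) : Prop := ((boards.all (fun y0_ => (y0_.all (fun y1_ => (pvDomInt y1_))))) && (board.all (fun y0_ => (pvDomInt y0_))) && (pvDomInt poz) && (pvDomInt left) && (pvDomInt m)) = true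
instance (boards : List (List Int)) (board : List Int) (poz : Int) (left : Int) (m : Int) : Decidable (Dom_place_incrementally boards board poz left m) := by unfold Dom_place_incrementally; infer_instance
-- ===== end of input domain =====

-- B rebuilds check_cell from closed-form coordinates (row r, column c of poz from
-- tri(r) = r(r+1)//2) instead of A's generator / (ix,jx) accumulators / list shifting,
-- and replaces A's accumulator-threaded recursion (gated by len(boards)==0) with a pure
-- Option-returning first-solution DFS (objective: alternative). Like A, B appends the
-- found board to `boards` in place; the theorems below are about the return value.

-- ===== PORT A =====
-- helper: list(triangular_numbers(n)) — `while i <= n` runs n.toNat times (i = 1..n)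
def pvTriAux : Nat → Int → Int → List Int
  | 0, _, _ => []
  | k + 1, i, t => t :: pvTriAux k (i + 1) (t + i)

def triangularNumbersList (n : Int) : List Int := pvTriAux n.toNat 1 0

-- check_cell.  Early `return False` is modelled by each of the three stages returning a
-- Bool and chaining with && (short-circuit).  `board[pos]` reads are ported with pyGetD
-- (default 0): the IndexError case is excluded by Pre_.

-- rows stage: for row in range(0, m) with state (ix, jx)
def pvRowsLoop (board : List Int) (poz : Int) : List Int → Int → Int → Bool
  | [], _, _ => true
  | row :: rest, ix, jx =>
    let ix' := ix + row + 1
    if poz < ix' ∧ jx ≤ poz then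
      if 0 < PySem.List.count (PySem.List.slice board (some jx) (some ix')) 1 then false
      else pvRowsLoop board poz rest ix' (jx + row + 1)
    else pvRowsLoop board poz rest ix' (jx + row + 1)

-- columns stage: possitions shifted each iteration; the inner count/`return False` loop
-- returns False at the first truthy board[pos], i.e. List.any; a clean pass hits `break`.
def pvColsLoop (board : List Int) (poz : Int) : List Int → List Int → Bool
  | [], _ => true
  | _col :: rest, poss =>
    if poss.contains poz then
      if poss.any (fun pos => PySem.List.pyGetD board pos 0 ≠ 0) then false else true
    else pvColsLoop board poz rest ((PySem.List.slice poss (some 1) none).map (fun x => x + 1))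

-- diagonals stage: possitions is rebuilt from triangular_nums every iteration (the trailing
-- `possitions = possitions[1:]` is dead, as in the Python); no break, loop continues.
def pvDiagLoop (board : List Int) (poz : Int) : List Int → List Int → Bool
  | [], _ => true
  | _diag :: rest, tn =>
    let poss := (PySem.List.enumerate tn 0).map (fun q => q.1 + q.2)
    if poss.contains poz then
      if poss.any (fun pos => PySem.List.pyGetD board pos 0 = 1) then false
      else pvDiagLoop board poz rest tn
    else pvDiagLoop board poz rest tn

def checkCell (board : List Int) (m : Int) (poz : Int) : Bool :=
  pvRowsLoop board poz (PySem.List.pyRange 0 m 1) 0 0 &&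
  pvColsLoop board poz (PySem.List.pyRange 0 m 1) (triangularNumbersList m) &&
  pvDiagLoop board poz (PySem.List.pyRange 0 m 1) (triangularNumbersList m)

-- A's recursion: fuel = left.toNat + 1 covers exactly the recursion depth (left decreases by 1
-- per call and calls happen only for left ≥ 1), so the fuel guard is never hit on a real run.
-- Loop state: (boards so far, broke?); `board_copy[p] = 1` is pySetD (IndexError excluded by Pre_).
def pvPlaceA : Nat → List (List Int) → List Int → Int → Int → Int → List (List Int)
  | 0, boards, _, _, _, _ => boards
  | fuel + 1, boards, board, poz, left, m =>
    if 0 ≤ left ∧ boards = [] then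
      ((PySem.List.pyRange (poz + 1) (PySem.List.len board - left) 1).foldl
        (fun st p =>
          if st.2 then st
          else
            if checkCell board m p then
              if left = 0 then (st.1 ++ [PySem.List.pySetD board p 1], true)
              else (pvPlaceA fuel st.1 (PySem.List.pySetD board p 1) p (left - 1) m, false)
            else st)
        (boards, false)).1
    else boards

def place_incrementally (boards : List (List Int)) (board : List Int) (poz : Int) (left : Int) (m : Int) : List (List Int) :=
  pvPlaceA (left.toNat + 1) boards board poz left m

-- ===== PORT B =====
-- _tri(r) = r*(r+1)//2
def pvTriB (r : Int) : Int := PySem.Int.floordiv (r * (r + 1)) 2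

-- row stage: find the row r of poz, fail iff that row's slice holds a 1 (then break)
def pvRowB (board : List Int) (poz : Int) : List Int → Bool
  | [] => true
  | r :: rest =>
    if pvTriB r ≤ poz ∧ poz < pvTriB (r + 1) then
      !((PySem.List.slice board (some (pvTriB r)) (some (pvTriB (r + 1)))).contains 1)
    else pvRowB board poz rest

-- column stage: with c = poz - tri(r), fail iff any board[tri(rr)+c] (rr = c..m-1) is truthy
def pvColB (board : List Int) (m : Int) (poz : Int) : List Int → Bool
  | [] => true
  | r :: rest =>
    if pvTriB r ≤ poz ∧ poz < pvTriB (r + 1) then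
      !((PySem.List.pyRange (poz - pvTriB r) m 1).any
          (fun rr => PySem.List.pyGetD board (pvTriB rr + (poz - pvTriB r)) 0 ≠ 0))
    else pvColB board m poz rest

-- diagonal stage: poz on the right edge iff poz = tri(r)+r; fail iff any board[tri(rr)+rr] == 1
def pvDiagB (board : List Int) (m : Int) (poz : Int) : List Int → Bool
  | [] => true
  | r :: rest =>
    if poz = pvTriB r + r then
      !((PySem.List.pyRange 0 m 1).any (fun rr => PySem.List.pyGetD board (pvTriB rr + rr) 0 = 1))
    else pvDiagB board m poz rest

def checkCellB (board : List Int) (m : Int) (poz : Int) : Bool :=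
  pvRowB board poz (PySem.List.pyRange 0 m 1) &&
  pvColB board m poz (PySem.List.pyRange 0 m 1) &&
  pvDiagB board m poz (PySem.List.pyRange 0 m 1)

-- _solve: first completed board in leftmost DFS order, or none; same fuel convention as A's port.
def pvSolveB : Nat → List Int → Int → Int → Int → Option (List Int)
  | 0, _, _, _, _ => none
  | fuel + 1, board, poz, left, m =>
    (PySem.List.pyRange (poz + 1) (PySem.List.len board - left) 1).foldl
      (fun acc p =>
        match acc with
        | some r => some r
        | none =>
          if checkCellB board m p then
            if left = 0 then some (PySem.List.pySetD board p 1)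
            else pvSolveB fuel (PySem.List.pySetD board p 1) p (left - 1) m
          else none)
      none

def place_incrementally_alt (boards : List (List Int)) (board : List Int) (poz : Int) (left : Int) (m : Int) : List (List Int) :=
  if 0 ≤ left ∧ boards.length = 0 then
    match pvSolveB (left.toNat + 1) board poz left m with
    | none => boards
    | some b => boards ++ [b]
  else boards

-- ===== PRECONDITION & SPEC =====
-- Pre_ excludes exactly the inputs on which Python A raises an IndexError: a first candidate
-- p = poz+1 below -len(board) (the write board_copy[p] = 1 raises), or a board shorter than the
-- m-th triangular number m*(m+1)/2 (check_cell's column/diagonal reads can go past the end).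
-- The triangular-number bound is slightly conservative: on some shorter boards the out-of-range
-- reads happen to be avoided and A still returns — see the cite in claim.json (B agrees there too).
-- Inputs on which A returns immediately (left < 0, boards nonempty, or an empty range) are always admitted.
def Pre_place_incrementally (boards : List (List Int)) (board : List Int) (poz : Int) (left : Int) (m : Int) : Prop :=
  (left < 0 ∨ boards ≠ [] ∨ (board.length : Int) - left ≤ poz + 1) ∨
  ((m ≤ 0 ∨ m * (m + 1) ≤ 2 * (board.length : Int)) ∧ -(board.length : Int) - 1 ≤ poz)

instance (boards : List (List Int)) (board : List Int) (poz : Int) (left : Int) (m : Int) : Decidable (Pre_place_incrementally boards board poz left m) := by unfold Pre_place_incrementally; infer_instance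

def pvWitness_place_incrementally : List (List Int) × List Int × Int × Int × Int := ([], [0, 0, 0, 0, 0, 0], -1, 0, 3)

def Spec_place_incrementally (boards : List (List Int)) (board : List Int) (poz : Int) (left : Int) (m : Int) (out : List (List Int)) : Prop := out = place_incrementally_alt boards board poz left m
instance (boards : List (List Int)) (board : List Int) (poz : Int) (left : Int) (m : Int) (out : List (List Int)) : Decidable (Spec_place_incrementally boards board poz left m out) := by unfold Spec_place_incrementally; infer_instance

-- ===== CLAIM (what is proved, stated in full; the proofs are below) =====
def Claim_equal_place_incrementally : Prop := ∀ (boards : List (List Int)) (board : List Int) (poz : Int) (left : Int) (m : Int), Dom_place_incrementally boards board poz left m → Pre_place_incrementally boards board poz left m → Spec_place_incrementally boards board poz left m (place_incrementally boards board poz left m)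

-- ===== LEMMAS AND PROOFS =====

-- ---- arithmetic facts about pvTriB ----
theorem pvTriB_succ (r : Int) : pvTriB (r + 1) = pvTriB r + (r + 1) := by
  obtain ⟨k, hk⟩ := Int.even_mul_succ_self r
  have h1 : r * (r + 1) = 2 * k := by omega
  have h2 : (r + 1) * (r + 1 + 1) = 2 * (k + (r + 1)) := by linear_combination h1
  unfold pvTriB
  rw [PySem.Int.floordiv_eq_ediv_of_pos (by norm_num), PySem.Int.floordiv_eq_ediv_of_pos (by norm_num),
    h1, h2, Int.mul_ediv_cancel_left _ (by norm_num), Int.mul_ediv_cancel_left _ (by norm_num)]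

theorem pvTriB_zero : pvTriB 0 = 0 := by decide

theorem pvTriB_mono (a b : Int) (ha : 0 ≤ a) (hab : a ≤ b) : pvTriB a ≤ pvTriB b := by
  obtain ⟨n, hn⟩ : ∃ n : Nat, b = a + n := ⟨(b - a).toNat, by omega⟩
  subst hn
  induction n with
  | zero => simp
  | succ k ih =>
    have hab' : a ≤ a + (k : Int) := by omega
    have hstep : a + ((k + 1 : Nat) : Int) = (a + k) + 1 := by push_cast; ring
    rw [hstep, pvTriB_succ]
    have := ih hab'
    omega

-- the row of poz is unique
theorem pvRow_uniq (poz r r' : Int) (hr : 0 ≤ r) (hr' : 0 ≤ r')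
    (h1 : pvTriB r ≤ poz ∧ poz < pvTriB (r + 1)) (h2 : pvTriB r' ≤ poz ∧ poz < pvTriB (r' + 1)) :
    r = r' := by
  by_contra hne
  rcases lt_or_gt_of_ne hne with h | h
  · have := pvTriB_mono (r + 1) r' (by omega) (by omega); omega
  · have := pvTriB_mono (r' + 1) r (by omega) (by omega); omega

-- uniqueness of the representation poz = tri(rr) + c with 0 ≤ c ≤ rr
theorem pvRep_uniq (poz r0 rr c : Int) (h0 : 0 ≤ r0)
    (hP0 : pvTriB r0 ≤ poz ∧ poz < pvTriB (r0 + 1))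
    (hc : 0 ≤ c) (hcr : c ≤ rr) (heq : poz = pvTriB rr + c) :
    rr = r0 ∧ c = poz - pvTriB r0 := by
  have hPrr : pvTriB rr ≤ poz ∧ poz < pvTriB (rr + 1) := by
    constructor
    · omega
    · rw [pvTriB_succ]; omega
  have := pvRow_uniq poz rr r0 (by omega) h0 hPrr hP0
  constructor
  · exact this
  · rw [← this]; omega

-- ---- the triangular-number list of A is pvTriB over a range ----
theorem pvTriAux_eq (k : Nat) : ∀ (r : Int), 0 ≤ r →
    pvTriAux k (r + 1) (pvTriB r) = (PySem.List.pyRange r (r + k) 1).map pvTriB := by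
  induction k with
  | zero => intro r _; rw [PySem.List.pyRange_one_eq_nil (by omega)]; rfl
  | succ n ih =>
    intro r hr
    rw [PySem.List.pyRange_one_cons (by push_cast; omega)]
    simp only [pvTriAux, List.map_cons]
    have h1 : pvTriB r + (r + 1) = pvTriB (r + 1) := (pvTriB_succ r).symm
    have h2 : r + 1 + 1 = (r + 1) + 1 := by ring
    have h3 : r + ((n + 1 : Nat) : Int) = (r + 1) + (n : Int) := by push_cast; ring
    rw [h1, h2, h3, ih (r + 1) (by omega)]

theorem triList_eq (m : Int) : triangularNumbersList m = (PySem.List.pyRange 0 m 1).map pvTriB := by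
  unfold triangularNumbersList
  by_cases hm : 0 ≤ m
  · have h0 : (0 : Int) + (m.toNat : Int) = m := by omega
    have := pvTriAux_eq m.toNat 0 le_rfl
    rw [h0] at this
    rw [show (1 : Int) = 0 + 1 by ring, show (0 : Int) = pvTriB 0 from pvTriB_zero.symm] at this ⊢
    exact this
  · rw [PySem.List.pyRange_one_eq_nil (by omega)]
    have : m.toNat = 0 := by omega
    rw [this]
    rfl

-- ---- rows stage ----
theorem pvRowsA_none (board : List Int) (poz m : Int) :
    ∀ (n : Nat) (r : Int), 0 ≤ r → (m - r).toNat = n → poz < pvTriB r →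
      pvRowsLoop board poz (PySem.List.pyRange r m 1) (pvTriB r) (pvTriB r) = true := by
  intro n
  induction n with
  | zero => intro r _ hn _; rw [PySem.List.pyRange_one_eq_nil (by omega)]; rfl
  | succ k ih =>
    intro r hr hn hp
    rw [PySem.List.pyRange_one_cons (by omega)]
    simp only [pvRowsLoop]
    rw [if_neg (by omega)]
    have h1 : pvTriB r + r + 1 = pvTriB (r + 1) := by rw [pvTriB_succ]; ring
    rw [h1]
    exact ih (r + 1) (by omega) (by omega) (by rw [pvTriB_succ]; omega)

theorem pvRowsA_eq (board : List Int) (poz m : Int) :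
    ∀ (n : Nat) (r : Int), 0 ≤ r → (m - r).toNat = n →
      pvRowsLoop board poz (PySem.List.pyRange r m 1) (pvTriB r) (pvTriB r) =
        pvRowB board poz (PySem.List.pyRange r m 1) := by
  intro n
  induction n with
  | zero => intro r _ hn; rw [PySem.List.pyRange_one_eq_nil (by omega)]; rfl
  | succ k ih =>
    intro r hr hn
    rw [PySem.List.pyRange_one_cons (by omega)]
    simp only [pvRowsLoop, pvRowB]
    have h1 : pvTriB r + r + 1 = pvTriB (r + 1) := by rw [pvTriB_succ]; ring
    by_cases hP : pvTriB r ≤ poz ∧ poz < pvTriB (r + 1)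
    · rw [if_pos (by omega), if_pos hP, h1]
      have hcnt : (0 < PySem.List.count (PySem.List.slice board (some (pvTriB r)) (some (pvTriB (r + 1)))) 1) ↔
          ((PySem.List.slice board (some (pvTriB r)) (some (pvTriB (r + 1)))).contains 1 = true) := by
        simp [PySem.List.count, List.count_pos_iff]
      cases hcon : (PySem.List.slice board (some (pvTriB r)) (some (pvTriB (r + 1)))).contains 1 with
      | true => rw [if_pos (hcnt.mpr hcon)]; rfl
      | false =>
        rw [if_neg (fun h => by rw [hcnt.mp h] at hcon; exact Bool.noConfusion hcon)]
        rw [pvRowsA_none board poz m k (r + 1) (by omega) (by omega) (by omega)]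
        rfl
    · rw [if_neg (by omega), if_neg hP, h1]
      exact ih (r + 1) (by omega) (by omega)

-- ---- columns stage ----
-- the position list after c shifts
def pvPossC (m c : Int) : List Int := (PySem.List.pyRange c m 1).map (fun rr => pvTriB rr + c)

theorem pvPossC_shift (m c : Int) :
    (PySem.List.slice (pvPossC m c) (some 1) none).map (fun x => x + 1) = pvPossC m (c + 1) := by
  rw [PySem.List.slice_from_one]
  unfold pvPossC
  by_cases h : c < m
  · rw [PySem.List.pyRange_one_cons h]
    simp only [List.map_cons, List.tail_cons, List.map_map]
    apply List.map_congr_left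
    intro x _
    simp
    ring
  · rw [PySem.List.pyRange_one_eq_nil (by omega), PySem.List.pyRange_one_eq_nil (by omega)]
    rfl

theorem pvPossC_mem (m c poz : Int) :
    poz ∈ pvPossC m c ↔ ∃ rr, c ≤ rr ∧ rr < m ∧ poz = pvTriB rr + c := by
  unfold pvPossC
  simp only [List.mem_map, PySem.List.mem_pyRange_one]
  constructor
  · rintro ⟨rr, ⟨h1, h2⟩, h3⟩; exact ⟨rr, h1, h2, h3.symm⟩
  · rintro ⟨rr, h1, h2, h3⟩; exact ⟨rr, ⟨h1, h2⟩, h3.symm⟩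

theorem pvColsA_none (board : List Int) (poz m : Int)
    (hno : ∀ r, 0 ≤ r → r < m → ¬(pvTriB r ≤ poz ∧ poz < pvTriB (r + 1))) :
    ∀ (n : Nat) (c : Int), 0 ≤ c → (m - c).toNat = n →
      pvColsLoop board poz (PySem.List.pyRange c m 1) (pvPossC m c) = true := by
  intro n
  induction n with
  | zero => intro c _ hn; rw [PySem.List.pyRange_one_eq_nil (by omega)]; rfl
  | succ k ih =>
    intro c hc hn
    rw [PySem.List.pyRange_one_cons (by omega)]
    simp only [pvColsLoop]
    have hmem : ¬ ((pvPossC m c).contains poz = true) := by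
      rw [List.contains_iff_mem, pvPossC_mem]
      rintro ⟨rr, h1, h2, h3⟩
      exact hno rr (by omega) h2 ⟨by omega, by rw [pvTriB_succ]; omega⟩
    rw [if_neg hmem, pvPossC_shift]
    exact ih (c + 1) (by omega) (by omega)

theorem pvColsA_found (board : List Int) (poz m r0 : Int) (h0 : 0 ≤ r0) (h0m : r0 < m)
    (hP0 : pvTriB r0 ≤ poz ∧ poz < pvTriB (r0 + 1)) :
    ∀ (n : Nat) (c : Int), 0 ≤ c → c ≤ poz - pvTriB r0 → (m - c).toNat = n →
      pvColsLoop board poz (PySem.List.pyRange c m 1) (pvPossC m c) =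
        !((PySem.List.pyRange (poz - pvTriB r0) m 1).any
            (fun rr => PySem.List.pyGetD board (pvTriB rr + (poz - pvTriB r0)) 0 ≠ 0)) := by
  have hc0r : poz - pvTriB r0 ≤ r0 := by have := pvTriB_succ r0; omega
  intro n
  induction n with
  | zero => intro c _ hcc hn; omega
  | succ k ih =>
    intro c hc hcc hn
    rw [PySem.List.pyRange_one_cons (by omega)]
    simp only [pvColsLoop]
    by_cases hceq : c = poz - pvTriB r0
    · subst hceq
      have hmem : (pvPossC m (poz - pvTriB r0)).contains poz = true := by
        rw [List.contains_iff_mem, pvPossC_mem]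
        exact ⟨r0, by omega, h0m, by omega⟩
      rw [if_pos hmem]
      simp only [pvPossC, List.any_map]
      cases hA : (PySem.List.pyRange (poz - pvTriB r0) m 1).any
          ((fun pos => decide (PySem.List.pyGetD board pos 0 ≠ 0)) ∘
            (fun rr => pvTriB rr + (poz - pvTriB r0))) with
      | false => simp only [Function.comp_def] at hA; rw [hA]; rfl
      | true => simp only [Function.comp_def] at hA; rw [hA]; rfl
    · have hmem : ¬ ((pvPossC m c).contains poz = true) := by
        rw [List.contains_iff_mem, pvPossC_mem]
        rintro ⟨rr, h1, h2, h3⟩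
        obtain ⟨he1, he2⟩ := pvRep_uniq poz r0 rr c h0 hP0 hc h1 h3
        omega
      rw [if_neg hmem, pvPossC_shift]
      exact ih (c + 1) (by omega) (by omega) (by omega)

-- B's column stage as a find?-style closed form
theorem pvColB_closed (board : List Int) (m poz : Int) : ∀ l : List Int,
    pvColB board m poz l =
      match l.find? (fun r => decide (pvTriB r ≤ poz ∧ poz < pvTriB (r + 1))) with
      | none => true
      | some r => !((PySem.List.pyRange (poz - pvTriB r) m 1).any
          (fun rr => PySem.List.pyGetD board (pvTriB rr + (poz - pvTriB r)) 0 ≠ 0)) := by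
  intro l
  induction l with
  | nil => rfl
  | cons r rest ih =>
    by_cases hP : pvTriB r ≤ poz ∧ poz < pvTriB (r + 1)
    · simp only [pvColB, if_pos hP]
      rw [List.find?_cons_of_pos (by simpa using hP)]
    · simp only [pvColB, if_neg hP]
      rw [List.find?_cons_of_neg (by simpa using hP)]
      exact ih

-- the full columns-stage equality
theorem pvCols_eq (board : List Int) (m poz : Int) :
    pvColsLoop board poz (PySem.List.pyRange 0 m 1) (triangularNumbersList m) =
      pvColB board m poz (PySem.List.pyRange 0 m 1) := by
  have hposs0 : triangularNumbersList m = pvPossC m 0 := by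
    rw [triList_eq]
    unfold pvPossC
    apply List.map_congr_left
    intro x _
    ring
  rw [hposs0, pvColB_closed]
  cases hf : (PySem.List.pyRange 0 m 1).find? (fun r => decide (pvTriB r ≤ poz ∧ poz < pvTriB (r + 1))) with
  | none =>
    have hno : ∀ r, 0 ≤ r → r < m → ¬(pvTriB r ≤ poz ∧ poz < pvTriB (r + 1)) := by
      intro r h1 h2 hP
      have := List.find?_eq_none.mp hf r (by rw [PySem.List.mem_pyRange_one]; exact ⟨h1, h2⟩)
      simp [hP] at this
    exact pvColsA_none board poz m hno (m - 0).toNat 0 le_rfl rfl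
  | some r0 =>
    have hmem := List.mem_of_find?_eq_some hf
    have hP0 : pvTriB r0 ≤ poz ∧ poz < pvTriB (r0 + 1) := by
      have := List.find?_some hf
      simpa using this
    rw [PySem.List.mem_pyRange_one] at hmem
    exact pvColsA_found board poz m r0 hmem.1 hmem.2 hP0 (m - 0).toNat 0 le_rfl (by omega) rfl

-- ---- diagonal stage ----
theorem pvDiagA_closed (board : List Int) (poz : Int) (tn : List Int) : ∀ l : List Int,
    pvDiagLoop board poz l tn =
      (l.isEmpty || !(((PySem.List.enumerate tn 0).map (fun q => q.1 + q.2)).contains poz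
          && ((PySem.List.enumerate tn 0).map (fun q => q.1 + q.2)).any
              (fun pos => PySem.List.pyGetD board pos 0 = 1))) := by
  intro l
  induction l with
  | nil => rfl
  | cons x rest ih =>
    simp only [pvDiagLoop]
    cases hcon : ((PySem.List.enumerate tn 0).map (fun q => q.1 + q.2)).contains poz with
    | true =>
      cases hany : ((PySem.List.enumerate tn 0).map (fun q => q.1 + q.2)).any
          (fun pos => decide (PySem.List.pyGetD board pos 0 = 1)) with
      | true => rfl
      | false =>
        show pvDiagLoop board poz rest tn = _
        rw [ih, hcon, hany]
        simp
    | false =>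
      show pvDiagLoop board poz rest tn = _
      rw [ih, hcon]
      simp

theorem pvDiagB_closed (board : List Int) (m poz : Int) : ∀ l : List Int,
    pvDiagB board m poz l =
      (!(l.any (fun r => poz = pvTriB r + r)) ||
        !((PySem.List.pyRange 0 m 1).any (fun rr => PySem.List.pyGetD board (pvTriB rr + rr) 0 = 1))) := by
  intro l
  induction l with
  | nil => rfl
  | cons r rest ih =>
    simp only [pvDiagB, List.any_cons]
    by_cases hr : poz = pvTriB r + r
    · rw [if_pos hr]; simp [hr]
    · rw [if_neg hr, ih]; simp [hr]

theorem pvDiagPoss_aux (n : Nat) : ∀ (a : Int),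
    (PySem.List.enumerate ((PySem.List.pyRange a (a + n) 1).map pvTriB) a).map (fun q => q.1 + q.2) =
      (PySem.List.pyRange a (a + n) 1).map (fun r => r + pvTriB r) := by
  induction n with
  | zero => intro a; rw [PySem.List.pyRange_one_eq_nil (by omega)]; rfl
  | succ k ih =>
    intro a
    rw [PySem.List.pyRange_one_cons (by push_cast; omega)]
    simp only [List.map_cons, PySem.List.enumerate_cons]
    have h3 : a + ((k + 1 : Nat) : Int) = (a + 1) + (k : Int) := by push_cast; ring
    rw [h3, ih (a + 1)]

theorem pvDiagPoss_eq (m : Int) :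
    (PySem.List.enumerate ((PySem.List.pyRange 0 m 1).map pvTriB) 0).map (fun q => q.1 + q.2) =
      (PySem.List.pyRange 0 m 1).map (fun r => r + pvTriB r) := by
  by_cases hm : 0 ≤ m
  · have h0 : (0 : Int) + (m.toNat : Int) = m := by omega
    have := pvDiagPoss_aux m.toNat 0
    rw [h0] at this
    exact this
  · rw [PySem.List.pyRange_one_eq_nil (by omega)]
    rfl

-- any over lists with p a = q a pointwise
theorem pvAnyCongr (l : List Int) (p q : Int → Bool) (h : ∀ a ∈ l, p a = q a) : l.any p = l.any q := by
  induction l with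
  | nil => rfl
  | cons x xs ih => simp [List.any_cons, h x (by simp), ih (fun a ha => h a (by simp [ha]))]

theorem pvDiag_eq (board : List Int) (m poz : Int) :
    pvDiagLoop board poz (PySem.List.pyRange 0 m 1) (triangularNumbersList m) =
      pvDiagB board m poz (PySem.List.pyRange 0 m 1) := by
  rw [pvDiagA_closed, pvDiagB_closed, triList_eq, pvDiagPoss_eq]
  have hcont : ((PySem.List.pyRange 0 m 1).map (fun r => r + pvTriB r)).contains poz =
      (PySem.List.pyRange 0 m 1).any (fun r => decide (poz = pvTriB r + r)) := by
    induction (PySem.List.pyRange 0 m 1) with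
    | nil => rfl
    | cons x xs ih =>
      simp only [List.map_cons, List.contains_cons, List.any_cons, ih]
      congr 1
      rw [Bool.eq_iff_iff]
      simp only [beq_iff_eq, decide_eq_true_eq]
      omega
  have hany : ((PySem.List.pyRange 0 m 1).map (fun r => r + pvTriB r)).any
        (fun pos => decide (PySem.List.pyGetD board pos 0 = 1)) =
      (PySem.List.pyRange 0 m 1).any (fun rr => decide (PySem.List.pyGetD board (pvTriB rr + rr) 0 = 1)) := by
    rw [List.any_map]
    exact pvAnyCongr _ _ _ (fun a _ => by simp only [Function.comp_def]; rw [Int.add_comm])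
  rw [hcont, hany]
  cases hE : PySem.List.pyRange 0 m 1 with
  | nil => rfl
  | cons a l => simp [Bool.not_and]

-- ---- check_cell equality ----
theorem checkCell_eq (board : List Int) (m poz : Int) :
    checkCell board m poz = checkCellB board m poz := by
  unfold checkCell checkCellB
  have h0 := pvRowsA_eq board poz m (m - 0).toNat 0 le_rfl rfl
  rw [pvTriB_zero] at h0
  rw [h0, pvCols_eq, pvDiag_eq]

-- ---- search equivalence (A's gated accumulator recursion vs B's Option DFS) ----
theorem pvPlaceA_ne_nil (fuel : Nat) (boards : List (List Int)) (board : List Int) (poz left m : Int) (h : boards ≠ []) : pvPlaceA fuel boards board poz left m = boards := by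
  cases fuel with
  | zero => rfl
  | succ f => simp [pvPlaceA, h]

theorem pv_foldl_rel (board : List Int) (left m : Int) (f : Nat)
    (hrec : ∀ (b : List Int) (p l : Int), 0 ≤ l → pvPlaceA f [] b p l m = (pvSolveB f b p l m).toList)
    (hl : 0 ≤ left) :
    ∀ (ps : List Int) (st : List (List Int) × Bool) (acc : Option (List Int)),
      st.1 = acc.toList → st.2 = (if left = 0 then acc.isSome else false) →
      (ps.foldl
        (fun st p =>
          if st.2 then st
          else
            if checkCell board m p then
              if left = 0 then (st.1 ++ [PySem.List.pySetD board p 1], true)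
              else (pvPlaceA f st.1 (PySem.List.pySetD board p 1) p (left - 1) m, false)
            else st) st).1
      = (ps.foldl
        (fun acc p =>
          match acc with
          | some r => some r
          | none =>
            if checkCellB board m p then
              if left = 0 then some (PySem.List.pySetD board p 1)
              else pvSolveB f (PySem.List.pySetD board p 1) p (left - 1) m
            else none) acc).toList
      ∧ (ps.foldl
        (fun st p =>
          if st.2 then st
          else
            if checkCell board m p then
              if left = 0 then (st.1 ++ [PySem.List.pySetD board p 1], true)
              else (pvPlaceA f st.1 (PySem.List.pySetD board p 1) p (left - 1) m, false)
            else st) st).2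
      = (if left = 0 then
          (ps.foldl
            (fun acc p =>
              match acc with
              | some r => some r
              | none =>
                if checkCellB board m p then
                  if left = 0 then some (PySem.List.pySetD board p 1)
                  else pvSolveB f (PySem.List.pySetD board p 1) p (left - 1) m
                else none) acc).isSome
         else false) := by
  intro ps
  induction ps with
  | nil => intro st acc h1 h2; exact ⟨h1, h2⟩
  | cons p rest ih =>
    intro st acc h1 h2
    simp only [List.foldl_cons]
    apply ih
    all_goals
      rcases acc with _ | r
      · -- acc = none
        by_cases hz : left = 0
        · simp [hz] at h2
          by_cases hc : checkCellB board m p <;> simp [checkCell_eq, hc, hz, h1, h2]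
        · simp [hz] at h2
          by_cases hc : checkCellB board m p <;>
            simp [checkCell_eq, hc, hz, h1, h2, hrec _ p (left - 1) (by omega)]
      · -- acc = some r
        by_cases hz : left = 0
        · simp [hz] at h2
          simp [hz, h1, h2]
        · simp [hz] at h2
          by_cases hc : checkCellB board m p <;>
            simp [checkCell_eq, hc, hz, h1, h2, pvPlaceA_ne_nil f [r] _ p (left - 1) m (by simp)]

theorem pvPlaceA_eq_solve (fuel : Nat) : ∀ (board : List Int) (poz left m : Int), 0 ≤ left →
    pvPlaceA fuel [] board poz left m = (pvSolveB fuel board poz left m).toList := by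
  induction fuel with
  | zero => intro _ _ _ _ _; rfl
  | succ f ih =>
    intro board poz left m hl
    have key := pv_foldl_rel board left m f (fun b p l h => ih b p l m h) hl
      (PySem.List.pyRange (poz + 1) (PySem.List.len board - left) 1)
      (([] : List (List Int)), false) none rfl (by simp)
    simpa [pvPlaceA, pvSolveB, hl] using key.1

-- ===== VERDICT (by name: the statement is the Claim_ definition above) =====
theorem place_incrementally_spec : Claim_equal_place_incrementally := by
  intro boards board poz left m _hdom _hpre
  unfold Spec_place_incrementally place_incrementally place_incrementally_alt
  by_cases hl : 0 ≤ left
  · by_cases hb : boards = []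
    · subst hb
      rw [pvPlaceA_eq_solve (left.toNat + 1) board poz left m hl]
      rcases h : pvSolveB (left.toNat + 1) board poz left m with _ | b <;> simp [hl]
    · rw [pvPlaceA_ne_nil _ _ _ _ _ _ hb]
      have : boards.length ≠ 0 := by simpa using hb
      simp [this]
  · have h1 : left.toNat + 1 = 0 + 1 := by omega
    rw [h1]
    simp [pvPlaceA, hl]
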